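-- pv_equiv track=rewrite | github.com/AungKhant2023/myanmar-nlp-tool | utilities_testing.py | segment_myanmar_text
-- ===== SOURCE A (Python) =====
-- def segment_myanmar_text(text, dictionary):
--     output = ""
--     i = 0
--     while i < len(text):
--         matched = False
--         for word in dictionary:
--             if text[i:].startswith(word):
--                 output += word + " "
--                 i += len(word)
--                 matched = True
--                 break
--         if not matched:
--             output += text[i] + " "
--             i += 1
--     return output
-- ===== SOURCE B (Python) =====
-- def segment_myanmar_text(text, dictionary):
--     # Index each distinct non-empty word by its first position in the dictionary,
--     # then at each text position probe only prefixes up to the longest word length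
--     # and take the match whose dictionary position is smallest (= A's first match).
--     index = {}
--     maxlen = 0
--     for pos, w in enumerate(dictionary):
--         if w and w not in index:
--             index[w] = pos
--             if len(w) > maxlen:
--                 maxlen = len(w)
--     parts = []
--     i = 0
--     n = len(text)
--     while i < n:
--         best = None
--         for L in range(1, min(maxlen, n - i) + 1):
--             p = index.get(text[i:i + L])
--             if p is not None and (best is None or p < best[0]):
--                 best = (p, L)
--         if best is None:
--             parts.append(text[i])
--             i += 1
--         else:
--             parts.append(text[i:i + best[1]])
--             i += best[1]
--     return " ".join(parts) + (" " if parts else "")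
-- ===== Notes on version B (the rewrite author's own statement) =====
-- stated objective: faster
-- what changed: B replaces A's per-position scan of the whole dictionary with a one-time hash index of distinct words keyed to their first dictionary position, probing only the prefix lengths up to the longest word at each position and taking the minimum-position match.
-- outside the precondition, e.g. on segment_myanmar_text('a', ['a', '']): A returns 'a ', B returns 'a '
import Mathlib
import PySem

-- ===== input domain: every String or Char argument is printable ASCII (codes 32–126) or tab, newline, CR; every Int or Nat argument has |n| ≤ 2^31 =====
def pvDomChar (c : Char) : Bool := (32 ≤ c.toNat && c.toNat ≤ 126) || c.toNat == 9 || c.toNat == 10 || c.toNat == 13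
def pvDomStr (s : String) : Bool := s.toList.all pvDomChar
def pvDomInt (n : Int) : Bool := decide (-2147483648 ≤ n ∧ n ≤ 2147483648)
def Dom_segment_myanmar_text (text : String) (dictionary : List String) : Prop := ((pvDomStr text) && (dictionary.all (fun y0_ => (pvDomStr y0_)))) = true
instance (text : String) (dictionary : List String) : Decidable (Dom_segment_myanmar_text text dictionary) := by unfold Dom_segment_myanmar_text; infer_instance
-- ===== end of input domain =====

-- B replaces A's per-position scan of the whole dictionary with a one-time hash index of the
-- distinct words (keyed to their first dictionary position) probed over prefix lengths only,
-- picking the minimum-position match; objective: faster (asymptotically fewer probes per position).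


-- ===== PORT A =====
-- inner 'for word in dictionary: if text[i:].startswith(word): … break'
def segA_find (rest : List Char) : List String → Option String
  | [] => none
  | w :: ws => if PySem.Chars.startswith rest w.toList then some w else segA_find rest ws

-- the while loop; fuel bounds the number of iterations (each iteration of the Python loop
-- advances i by ≥ 1 whenever "" is not in the dictionary, so fuel = len(text) is enough on Pre_).
-- text[i:] with 0 ≤ i is tl.drop i (PySem.List.slice_from_natCast); text[i] for i < len is (tl.drop i).take 1.
def segA_loop (tl : List Char) (dict : List String) : Nat → Nat → List Char → List Char
  | 0, _, out => out
  | fuel + 1, i, out =>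
    if i < tl.length then
      match segA_find (tl.drop i) dict with
      | some w => segA_loop tl dict fuel (i + w.toList.length) (out ++ w.toList ++ [' '])
      | none => segA_loop tl dict fuel (i + 1) (out ++ (tl.drop i).take 1 ++ [' '])
    else out

def segment_myanmar_text (text : String) (dictionary : List String) : String :=
  String.ofList (segA_loop text.toList dictionary text.toList.length 0 [])

-- ===== PORT B =====
-- 'if w and w not in index: index[w] = pos; if len(w) > maxlen: maxlen = len(w)'
def segB_step (st : PySem.Dict (List Char) Int × Int) (pw : Int × String) : PySem.Dict (List Char) Int × Int :=
  if pw.2.toList ≠ [] ∧ st.1.contains pw.2.toList = false then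
    (st.1.insert pw.2.toList pw.1, if st.2 < PySem.Str.len pw.2 then PySem.Str.len pw.2 else st.2)
  else st

-- 'for pos, w in enumerate(dictionary): …'
def segB_build (dictionary : List String) : PySem.Dict (List Char) Int × Int :=
  (PySem.List.enumerate dictionary).foldl segB_step (PySem.Dict.empty, 0)

-- body of 'for L in …: p = index.get(text[i:i+L]); if p is not None and (best is None or p < best[0]): best = (p, L)'
-- text[i:i+L] with 0 ≤ i, 0 ≤ L is rest.take L.toNat for rest = tl.drop i (PySem.List.slice_natCast_add).
def segB_pick (idx : PySem.Dict (List Char) Int) (rest : List Char) (best : Option (Int × Int)) (L : Int) : Option (Int × Int) :=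
  match idx.get? (rest.take L.toNat) with
  | some p =>
    match best with
    | none => some (p, L)
    | some b => if p < b.1 then some (p, L) else best
  | none => best

-- 'best = None; for L in range(1, min(maxlen, n - i) + 1): …'
def segB_inner (tl : List Char) (idx : PySem.Dict (List Char) Int) (mx : Int) (i : Nat) : Option (Int × Int) :=
  (PySem.List.pyRange 1 (min mx ((tl.length : Int) - (i : Int)) + 1)).foldl (segB_pick idx (tl.drop i)) none

-- B's while loop, collecting parts; same fuel bound (every iteration advances i by ≥ 1).
def segB_loop (tl : List Char) (idx : PySem.Dict (List Char) Int) (mx : Int) : Nat → Nat → List (List Char) → List (List Char)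
  | 0, _, parts => parts
  | fuel + 1, i, parts =>
    if i < tl.length then
      match segB_inner tl idx mx i with
      | some b => segB_loop tl idx mx fuel (i + b.2.toNat) (parts ++ [(tl.drop i).take b.2.toNat])
      | none => segB_loop tl idx mx fuel (i + 1) (parts ++ [(tl.drop i).take 1])
    else parts

-- '" ".join(parts) + (" " if parts else "")'
def segment_myanmar_text_alt (text : String) (dictionary : List String) : String :=
  let b := segB_build dictionary
  let parts := segB_loop text.toList b.1 b.2 text.toList.length 0 []
  String.ofList (PySem.Chars.join [' '] parts ++ (if parts = [] then [] else [' ']))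

-- ===== PRECONDITION & SPEC =====
-- Pre_ excludes non-empty texts whose dictionary contains "": there A's loop in general never
-- returns (matching "" advances i by 0, an infinite loop); it is excluded wholesale, so it also
-- drops the inputs where A happens to return because an earlier non-empty word matches at every
-- position ("" then never wins and A and B agree anyway).
def Pre_segment_myanmar_text (text : String) (dictionary : List String) : Prop :=
  text = "" ∨ "" ∉ dictionary
instance (text : String) (dictionary : List String) : Decidable (Pre_segment_myanmar_text text dictionary) := by unfold Pre_segment_myanmar_text; infer_instance

def pvWitness_segment_myanmar_text : String × List String := ("abcab", ["ab", "ca", "b"])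

def Spec_segment_myanmar_text (text : String) (dictionary : List String) (out : String) : Prop := out = segment_myanmar_text_alt text dictionary
instance (text : String) (dictionary : List String) (out : String) : Decidable (Spec_segment_myanmar_text text dictionary out) := by unfold Spec_segment_myanmar_text; infer_instance

-- ===== CLAIM (what is proved, stated in full; the proofs are below) =====
def Claim_equal_segment_myanmar_text : Prop := ∀ (text : String) (dictionary : List String), Dom_segment_myanmar_text text dictionary → Pre_segment_myanmar_text text dictionary → Spec_segment_myanmar_text text dictionary (segment_myanmar_text text dictionary)

-- ===== LEMMAS AND PROOFS =====

-- first position (as Python int, counting from s) of a non-empty word equal to cs in the list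
def firstPos : List String → Int → List Char → Option Int
  | [], _, _ => none
  | w :: t, s, cs => if w.toList = cs ∧ w.toList ≠ [] then some s else firstPos t (s + 1) cs

theorem toList_ne_nil (w : String) (h : w ≠ "") : w.toList ≠ [] := by
  intro hl
  apply h
  have := congrArg String.ofList hl
  simpa using this

theorem firstPos_ge (l : List String) : ∀ (s : Int) (cs : List Char) (p : Int),
    firstPos l s cs = some p → s ≤ p := by
  induction l with
  | nil => intro s cs p h; simp [firstPos] at h
  | cons w t ih =>
    intro s cs p h
    simp only [firstPos] at h
    split at h
    · cases h; omega
    · have := ih (s + 1) cs p h; omega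

-- the built index looks up exactly firstPos
theorem build_get?_aux (l : List String) : ∀ (s : Int) (d : PySem.Dict (List Char) Int) (mx : Int) (cs : List Char),
    ((PySem.List.enumerate l s).foldl segB_step (d, mx)).1.get? cs = (d.get? cs).or (firstPos l s cs) := by
  induction l with
  | nil => intro s d mx cs; simp [PySem.List.enumerate, firstPos]
  | cons w t ih =>
    intro s d mx cs
    have henum : PySem.List.enumerate (w :: t) s = (s, w) :: PySem.List.enumerate t (s + 1) := by
      simp [PySem.List.enumerate]
    rw [henum, List.foldl_cons]
    by_cases hc : w.toList ≠ [] ∧ d.contains w.toList = false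
    · have hstep : segB_step (d, mx) (s, w) =
          (d.insert w.toList s, if mx < PySem.Str.len w then PySem.Str.len w else mx) := by
        simp [segB_step, hc]
      rw [hstep, ih]
      by_cases hcs : cs = w.toList
      · subst hcs
        have hdn : d.get? w.toList = none := (PySem.Dict.get?_eq_none_iff_contains d w.toList).mpr hc.2
        rw [PySem.Dict.get?_insert, if_pos rfl, hdn]
        simp [firstPos, hc.1]
      · rw [PySem.Dict.get?_insert, if_neg hcs]
        have hfp : firstPos (w :: t) s cs = firstPos t (s + 1) cs := by
          simp only [firstPos]
          rw [if_neg]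
          intro hx
          exact hcs hx.1.symm
        rw [hfp]
    · have hstep : segB_step (d, mx) (s, w) = (d, mx) := by
        simp only [segB_step]
        rw [if_neg hc]
      rw [hstep, ih]
      cases hg : d.get? cs with
      | some v => simp
      | none =>
        have hfp : firstPos (w :: t) s cs = firstPos t (s + 1) cs := by
          simp only [firstPos]
          rw [if_neg]
          intro hx
          rcases hx with ⟨hx1, hx2⟩
          apply hc
          refine ⟨hx2, ?_⟩
          rw [← hx1] at hg
          exact (PySem.Dict.get?_eq_none_iff_contains d w.toList).mp hg
        rw [hfp]

theorem build_get? (dict : List String) (cs : List Char) :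
    (segB_build dict).1.get? cs = firstPos dict 0 cs := by
  unfold segB_build
  rw [build_get?_aux]
  simp

-- every indexed key has length ≤ maxlen
theorem build_len_aux (l : List String) : ∀ (s : Int) (d : PySem.Dict (List Char) Int) (mx : Int),
    (∀ cs : List Char, d.get? cs ≠ none → (cs.length : Int) ≤ mx) →
    ∀ cs : List Char, ((PySem.List.enumerate l s).foldl segB_step (d, mx)).1.get? cs ≠ none →
      (cs.length : Int) ≤ ((PySem.List.enumerate l s).foldl segB_step (d, mx)).2 := by
  induction l with
  | nil =>
    intro s d mx hinv cs h
    simp only [PySem.List.enumerate, List.foldl_nil] at h ⊢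
    exact hinv cs h
  | cons w t ih =>
    intro s d mx hinv cs h
    have henum : PySem.List.enumerate (w :: t) s = (s, w) :: PySem.List.enumerate t (s + 1) := by
      simp [PySem.List.enumerate]
    rw [henum, List.foldl_cons] at h ⊢
    by_cases hc : w.toList ≠ [] ∧ d.contains w.toList = false
    · have hstep : segB_step (d, mx) (s, w) =
          (d.insert w.toList s, if mx < PySem.Str.len w then PySem.Str.len w else mx) := by
        simp [segB_step, hc]
      rw [hstep] at h ⊢
      refine ih (s + 1) _ _ ?_ cs h
      intro cs' h'
      rw [PySem.Dict.get?_insert] at h'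
      by_cases hcs : cs' = w.toList
      · subst hcs
        rw [PySem.Str.len_eq]
        split <;> omega
      · rw [if_neg hcs] at h'
        have := hinv cs' h'
        split <;> omega
    · have hstep : segB_step (d, mx) (s, w) = (d, mx) := by
        simp only [segB_step]
        rw [if_neg hc]
      rw [hstep] at h ⊢
      exact ih (s + 1) d mx hinv cs h

theorem build_len (dict : List String) (cs : List Char) (p : Int)
    (h : firstPos dict 0 cs = some p) : (cs.length : Int) ≤ (segB_build dict).2 := by
  have hg : (segB_build dict).1.get? cs ≠ none := by
    rw [build_get? dict cs, h]; simp
  unfold segB_build at hg ⊢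
  exact build_len_aux dict 0 PySem.Dict.empty 0 (by intro cs' h'; simp [PySem.Dict.get?_empty] at h') cs hg

-- A finds no match: no prefix of rest occurs in the dictionary
theorem find_none_firstPos (rest : List Char) (l : List String) : ∀ (s : Int),
    segA_find rest l = none → ∀ (cs : List Char), cs <+: rest → firstPos l s cs = none := by
  induction l with
  | nil => intro s _ cs _; simp [firstPos]
  | cons w t ih =>
    intro s hfind cs hpre
    simp only [segA_find] at hfind
    split at hfind
    · exact absurd hfind (by simp)
    · rename_i hns
      simp only [firstPos]
      rw [if_neg]
      · exact ih (s + 1) hfind cs hpre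
      · intro hx
        apply hns
        rw [hx.1]
        exact (List.isPrefixOf_iff_prefix).mpr hpre

-- A's first match is the prefix of rest with the strictly smallest firstPos
theorem find_some_firstPos (rest : List Char) (l : List String) : ∀ (s : Int) (w : String),
    "" ∉ l → segA_find rest l = some w →
    w.toList <+: rest ∧ ∃ k : Int, firstPos l s w.toList = some k ∧
      (∀ (cs : List Char) (p : Int), cs <+: rest → firstPos l s cs = some p → k ≤ p) ∧
      (∀ cs : List Char, cs <+: rest → firstPos l s cs = some k → cs = w.toList) := by
  induction l with
  | nil => intro s w _ h; simp [segA_find] at h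
  | cons w0 t ih =>
    intro s w hne hfind
    have hw0 : w0.toList ≠ [] := toList_ne_nil w0 (by intro hx; exact hne (by simp [hx]))
    have hnet : "" ∉ t := by intro hx; exact hne (by simp [hx])
    simp only [segA_find] at hfind
    split at hfind
    · rename_i hs
      have hw : w0 = w := by cases hfind; rfl
      subst hw
      have hpre : w0.toList <+: rest := (List.isPrefixOf_iff_prefix).mp (by simpa [PySem.Chars.startswith] using hs)
      refine ⟨hpre, s, ?_, ?_, ?_⟩
      · simp [firstPos, hw0]
      · intro cs p _ hfp
        simp only [firstPos] at hfp
        split at hfp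
        · cases hfp; omega
        · have := firstPos_ge t (s + 1) cs p hfp; omega
      · intro cs _ hfp
        simp only [firstPos] at hfp
        split at hfp
        · rename_i hx; exact hx.1.symm
        · have := firstPos_ge t (s + 1) cs s hfp; omega
    · rename_i hns
      have hnp : ¬ (w0.toList <+: rest) := by
        intro hx
        exact hns (by simpa [PySem.Chars.startswith] using (List.isPrefixOf_iff_prefix).mpr hx)
      obtain ⟨hpre, k, hk, hmin, huniq⟩ := ih (s + 1) w hnet hfind
      have hred : ∀ cs : List Char, cs <+: rest → firstPos (w0 :: t) s cs = firstPos t (s + 1) cs := by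
        intro cs hcs
        simp only [firstPos]
        rw [if_neg]
        intro hx
        exact hnp (hx.1 ▸ hcs)
      refine ⟨hpre, k, ?_, ?_, ?_⟩
      · rw [hred w.toList hpre]; exact hk
      · intro cs p hcs hfp
        rw [hred cs hcs] at hfp
        exact hmin cs p hcs hfp
      · intro cs hcs hfp
        rw [hred cs hcs] at hfp
        exact huniq cs hcs hfp

-- one step of the best-candidate fold is none iff nothing was found yet
theorem pick_step_none (idx : PySem.Dict (List Char) Int) (rest : List Char) (b : Option (Int × Int)) (L : Int) :
    segB_pick idx rest b L = none ↔ b = none ∧ idx.get? (rest.take L.toNat) = none := by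
  cases hg : idx.get? (rest.take L.toNat) with
  | none => simp [segB_pick, hg]
  | some p =>
    cases b with
    | none => simp [segB_pick, hg]
    | some q =>
      simp only [segB_pick, hg]
      split <;> simp

theorem pick_fold_none (idx : PySem.Dict (List Char) Int) (rest : List Char) :
    ∀ (ls : List Int) (b : Option (Int × Int)),
    (ls.foldl (segB_pick idx rest) b = none ↔ b = none ∧ ∀ L ∈ ls, idx.get? (rest.take L.toNat) = none) := by
  intro ls
  induction ls with
  | nil => intro b; simp
  | cons L0 ls ih =>
    intro b
    rw [List.foldl_cons, ih, pick_step_none]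
    constructor
    · rintro ⟨⟨hb, h0⟩, hall⟩
      refine ⟨hb, ?_⟩
      intro L hL
      rcases List.mem_cons.mp hL with h | h
      · exact h ▸ h0
      · exact hall L h
    · rintro ⟨hb, hall⟩
      exact ⟨⟨hb, hall L0 List.mem_cons_self⟩, fun L hL => hall L (List.mem_cons_of_mem _ hL)⟩

theorem pick_fold_some (idx : PySem.Dict (List Char) Int) (rest : List Char) :
    ∀ (ls : List Int) (b : Option (Int × Int)) (p L : Int),
    ls.foldl (segB_pick idx rest) b = some (p, L) →
    ((b = some (p, L)) ∨ (L ∈ ls ∧ idx.get? (rest.take L.toNat) = some p))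
    ∧ (∀ L' ∈ ls, ∀ p' : Int, idx.get? (rest.take L'.toNat) = some p' → p ≤ p')
    ∧ (∀ q : Int × Int, b = some q → p ≤ q.1) := by
  intro ls
  induction ls with
  | nil =>
    intro b p L h
    simp only [List.foldl_nil] at h
    refine ⟨Or.inl h, by simp, ?_⟩
    intro q hq
    rw [h] at hq
    cases hq
    rfl
  | cons L0 ls ih =>
    intro b p L h
    rw [List.foldl_cons] at h
    obtain ⟨hsrc, hmin, hb⟩ := ih (segB_pick idx rest b L0) p L h
    have hstep : ∀ q : Int × Int, segB_pick idx rest b L0 = some q →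
        (∀ p0 : Int, idx.get? (rest.take L0.toNat) = some p0 → q.1 ≤ p0) ∧
        (b = some q ∨ (idx.get? (rest.take L0.toNat) = some q.1 ∧ q.2 = L0)) ∧
        (∀ r : Int × Int, b = some r → q.1 ≤ r.1) := by
      intro q hq
      cases hg : idx.get? (rest.take L0.toNat) with
      | none =>
        simp only [segB_pick, hg] at hq
        refine ⟨?_, Or.inl hq, ?_⟩
        · intro p0 h0
          exact absurd h0 (by simp)
        · intro r hr
          rw [hr] at hq
          injection hq with hq
          rw [hq]
      | some p0 =>
        cases b with
        | none =>
          simp only [segB_pick, hg] at hq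
          injection hq with hq
          cases hq
          refine ⟨?_, Or.inr ⟨rfl, rfl⟩, by intro r hr; cases hr⟩
          intro p1 h1
          injection h1 with h1
          exact le_of_eq h1
        | some r0 =>
          simp only [segB_pick, hg] at hq
          by_cases hlt : p0 < r0.1
          · rw [if_pos hlt] at hq
            injection hq with hq
            cases hq
            refine ⟨?_, Or.inr ⟨rfl, rfl⟩, ?_⟩
            · intro p1 h1
              injection h1 with h1
              exact le_of_eq h1
            · intro r hr
              injection hr with hr
              cases hr
              omega
          · rw [if_neg hlt] at hq
            injection hq with hq
            cases hq
            refine ⟨?_, Or.inl rfl, ?_⟩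
            · intro p1 h1
              injection h1 with h1
              omega
            · intro r hr
              injection hr with hr
              rw [← hr]
    refine ⟨?_, ?_, ?_⟩
    · rcases hsrc with hsrc | hsrc
      · obtain ⟨_, hsel, _⟩ := hstep (p, L) hsrc
        rcases hsel with h' | h'
        · exact Or.inl h'
        · obtain ⟨h1, h2⟩ := h'
          have h2' : L = L0 := by simpa using h2
          subst h2'
          exact Or.inr ⟨List.mem_cons_self, by simpa using h1⟩
      · exact Or.inr ⟨List.mem_cons_of_mem _ hsrc.1, hsrc.2⟩
    · intro L' hL' p' hp'
      rcases List.mem_cons.mp hL' with h' | h'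
      · subst h'
        cases hq : segB_pick idx rest b L' with
        | none =>
          rw [((pick_step_none idx rest b L').mp hq).2] at hp'
          cases hp'
        | some q =>
          have h1 := (hstep q hq).1 p' hp'
          have h2 := hb q hq
          omega
      · exact hmin L' h' p' hp'
    · intro q hq
      cases hq2 : segB_pick idx rest b L0 with
      | none =>
        rw [((pick_step_none idx rest b L0).mp hq2).1] at hq
        cases hq
      | some r =>
        have h1 := (hstep r hq2).2.2 q hq
        have h2 := hb r hq2
        omega

theorem segA_find_mem (rest : List Char) (l : List String) (w : String) :
    segA_find rest l = some w → w ∈ l := by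
  induction l with
  | nil => intro h; simp [segA_find] at h
  | cons w0 t ih =>
    intro h
    simp only [segA_find] at h
    split at h
    · cases h; exact List.mem_cons_self
    · exact List.mem_cons_of_mem _ (ih h)

-- the heart: B's inner loop returns exactly A's first match (with its length)
theorem inner_eq (dict : List String) (h0 : "" ∉ dict) (tl : List Char) (i : Nat) (hi : i < tl.length) :
    (segA_find (tl.drop i) dict = none → segB_inner tl (segB_build dict).1 (segB_build dict).2 i = none) ∧
    (∀ w : String, segA_find (tl.drop i) dict = some w →
      w.toList <+: tl.drop i ∧
        segB_inner tl (segB_build dict).1 (segB_build dict).2 i =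
          some ((firstPos dict 0 w.toList).getD 0, (w.toList.length : Int))) := by
  have hb : (tl.length : Int) - (i : Int) = ((tl.drop i).length : Int) := by
    simp only [List.length_drop]
    omega
  set rest := tl.drop i with hrest
  constructor
  · intro hA
    unfold segB_inner
    rw [hb]
    apply (pick_fold_none _ _ _ _).mpr
    refine ⟨rfl, ?_⟩
    intro L hL
    cases hg : (segB_build dict).1.get? (rest.take L.toNat) with
    | none => rfl
    | some p =>
      rw [build_get?] at hg
      rw [find_none_firstPos rest dict 0 hA (rest.take L.toNat) (List.take_prefix _ _)] at hg
      cases hg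
  · intro w hA
    obtain ⟨hpre, k, hk, hmin, huniq⟩ := find_some_firstPos rest dict 0 w h0 hA
    refine ⟨hpre, ?_⟩
    rw [hk]
    simp only [Option.getD_some]
    unfold segB_inner
    rw [hb]
    have hwmem : w ∈ dict := segA_find_mem rest dict w hA
    have hwne : w.toList ≠ [] := toList_ne_nil w (fun h => h0 (h ▸ hwmem))
    have h1L : (1 : Int) ≤ (w.toList.length : Int) := by
      have : 0 < w.toList.length := List.length_pos_iff.mpr hwne
      omega
    have hLmx : ((w.toList.length : Int)) ≤ (segB_build dict).2 := build_len dict w.toList k hk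
    have hLrl : ((w.toList.length : Int)) ≤ (rest.length : Int) := by exact_mod_cast hpre.length_le
    have htake : rest.take ((w.toList.length : Int)).toNat = w.toList := by
      have h2 : ((w.toList.length : Int)).toNat = w.toList.length := by omega
      rw [h2, ← List.prefix_iff_eq_take.mp hpre]
    have hmem : ((w.toList.length : Int)) ∈
        PySem.List.pyRange 1 (min (segB_build dict).2 ((rest.length : Int)) + 1) := by
      rw [PySem.List.mem_pyRange_one]
      omega
    have hPLw : (segB_build dict).1.get? (rest.take ((w.toList.length : Int)).toNat) = some k := by
      rw [htake, build_get?]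
      exact hk
    cases hres : (PySem.List.pyRange 1 (min (segB_build dict).2 ((rest.length : Int)) + 1)).foldl
        (segB_pick (segB_build dict).1 rest) none with
    | none =>
      have hc := ((pick_fold_none _ _ _ _).mp hres).2 ((w.toList.length : Int)) hmem
      rw [hPLw] at hc
      cases hc
    | some pl =>
      obtain ⟨p, L⟩ := pl
      obtain ⟨hsrc, hminf, -⟩ := pick_fold_some _ _ _ _ p L hres
      rcases hsrc with h | ⟨hLmem, hPL⟩
      · cases h
      have hpk1 : p ≤ k := hminf ((w.toList.length : Int)) hmem k hPLw
      have hk2 : k ≤ p := by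
        have hg : firstPos dict 0 (rest.take L.toNat) = some p := by
          rw [← build_get?]
          exact hPL
        exact hmin _ p (List.take_prefix _ _) hg
      have hpk : p = k := le_antisymm hpk1 hk2
      subst hpk
      have hLrange := PySem.List.mem_pyRange_one.mp hLmem
      have hcs : rest.take L.toNat = w.toList := by
        refine huniq _ (List.take_prefix _ _) ?_
        rw [← build_get?]
        exact hPL
      have hlen : L = ((w.toList.length : Int)) := by
        have hlen1 : (rest.take L.toNat).length = w.toList.length := by rw [hcs]
        rw [List.length_take] at hlen1
        omega
      rw [hlen]

-- B's loop accumulates on the right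
theorem segB_loop_append (tl : List Char) (idx : PySem.Dict (List Char) Int) (mx : Int) :
    ∀ (fuel i : Nat) (parts : List (List Char)),
    segB_loop tl idx mx fuel i parts = parts ++ segB_loop tl idx mx fuel i [] := by
  intro fuel
  induction fuel with
  | zero => intro i parts; simp [segB_loop]
  | succ f ih =>
    intro i parts
    by_cases hi : i < tl.length
    · cases hb : segB_inner tl idx mx i with
      | some b =>
        simp only [segB_loop, hb, if_pos hi]
        rw [ih, ih (i + b.2.toNat) ([] ++ [(tl.drop i).take b.2.toNat])]
        simp [List.append_assoc]
      | none =>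
        simp only [segB_loop, hb, if_pos hi]
        rw [ih, ih (i + 1) ([] ++ [(tl.drop i).take 1])]
        simp [List.append_assoc]
    · simp [segB_loop, hi]

-- the two while loops emit the same tokens
theorem loop_eq (dict : List String) (h0 : "" ∉ dict) (tl : List Char) :
    ∀ (fuel i : Nat) (out : List Char),
    segA_loop tl dict fuel i out =
      out ++ (segB_loop tl (segB_build dict).1 (segB_build dict).2 fuel i []).flatMap (· ++ [' ']) := by
  intro fuel
  induction fuel with
  | zero => intro i out; simp [segA_loop, segB_loop]
  | succ f ih =>
    intro i out
    by_cases hi : i < tl.length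
    · obtain ⟨hnone, hsome⟩ := inner_eq dict h0 tl i hi
      cases hA : segA_find (tl.drop i) dict with
      | none =>
        have hB := hnone hA
        simp only [segA_loop, segB_loop, hA, hB, if_pos hi]
        rw [ih, segB_loop_append tl _ _ f (i + 1) ([] ++ [(tl.drop i).take 1])]
        simp [List.append_assoc]
      | some w =>
        obtain ⟨hpre, heq⟩ := hsome w hA
        have htok : (tl.drop i).take w.length = w.toList := by
          simpa using (List.prefix_iff_eq_take.mp hpre).symm
        simp only [segA_loop, segB_loop, hA, heq, if_pos hi]
        rw [ih, segB_loop_append tl _ _ f _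
          ([] ++ [(tl.drop i).take (((firstPos dict 0 w.toList).getD 0, (w.toList.length : Int)).2.toNat)])]
        simp [htok, List.append_assoc]
    · simp [segA_loop, segB_loop, hi]

-- '" ".join(parts) + trailing space' is the flat token stream
theorem join_space (ts : List (List Char)) :
    PySem.Chars.join [' '] ts ++ (if ts = [] then [] else [' ']) = ts.flatMap (· ++ [' ']) := by
  induction ts with
  | nil => simp [PySem.Chars.join_nil]
  | cons a ts ih =>
    cases ts with
    | nil => simp [PySem.Chars.join_singleton]
    | cons b ts2 =>
      rw [PySem.Chars.join_cons_cons, if_neg (by simp : ¬(a :: b :: ts2 = ([] : List (List Char))))]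
      rw [if_neg (by simp)] at ih
      rw [List.flatMap_cons, ← ih]
      simp [List.append_assoc]

-- ===== VERDICT (by name: the statement is the Claim_ definition above) =====
theorem segment_myanmar_text_spec : Claim_equal_segment_myanmar_text := by
  intro text dict hDom hPre
  unfold Spec_segment_myanmar_text
  by_cases h0 : "" ∈ dict
  · have ht : text = "" := by
      rcases hPre with h | h
      · exact h
      · exact absurd h0 h
    subst ht
    rfl
  · unfold segment_myanmar_text segment_myanmar_text_alt
    rw [loop_eq dict h0 text.toList text.toList.length 0 []]
    simp [join_space]
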